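-- pv_equiv track=rewrite | github.com/stolendust/advenofcode2021-myhomework | day8_7segment/main.py | find_matched_item
-- ===== SOURCE A (Python) =====
-- def find_matched_item(matched_dict, new, origin):
--     new_matched = matched_dict.copy()
--     for m in matched_dict:
--         set_m = set(m)
--         set_new = set(new)
--         if not set_m.issubset(set_new): continue
--
--         new_shorted = "".join(sorted(set_new.difference(set_m)))
--         origin_shorted = "".join(sorted(set(origin).difference(set(matched_dict[m]))))
--         return find_matched_item(matched_dict, new_shorted, origin_shorted)
--     new_matched[new] = origin
--     return new_matched
-- ===== SOURCE B (Python) =====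
-- def find_matched_item(matched_dict, new, origin):
--     # Iterative reduction on character sets: precompute each rule's key/value
--     # sets once, shrink the current sets in a loop, and sort/join only once at
--     # the end (the input strings are kept verbatim if no rule ever applied).
--     rules = [(set(k), set(v)) for k, v in matched_dict.items()]
--     sn = set(new)
--     so = set(origin)
--     reduced = False
--     while True:
--         hit = next(((rk, rv) for rk, rv in rules if rk <= sn), None)
--         if hit is None:
--             break
--         sn -= hit[0]
--         so -= hit[1]
--         reduced = True
--     result = dict(matched_dict)
--     if reduced:
--         result["".join(sorted(sn))] = "".join(sorted(so))
--     else: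
--         result[new] = origin
--     return result
-- ===== Notes on version B (the rewrite author's own statement) =====
-- stated objective: alternative
-- what changed: Replaces A's tail recursion that rebuilds sorted strings and re-derives character sets at every level by an iterative loop over precomputed (key-set, value-set) rule pairs that shrinks the current character sets in place and sorts/joins only once at the end.
import Mathlib
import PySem

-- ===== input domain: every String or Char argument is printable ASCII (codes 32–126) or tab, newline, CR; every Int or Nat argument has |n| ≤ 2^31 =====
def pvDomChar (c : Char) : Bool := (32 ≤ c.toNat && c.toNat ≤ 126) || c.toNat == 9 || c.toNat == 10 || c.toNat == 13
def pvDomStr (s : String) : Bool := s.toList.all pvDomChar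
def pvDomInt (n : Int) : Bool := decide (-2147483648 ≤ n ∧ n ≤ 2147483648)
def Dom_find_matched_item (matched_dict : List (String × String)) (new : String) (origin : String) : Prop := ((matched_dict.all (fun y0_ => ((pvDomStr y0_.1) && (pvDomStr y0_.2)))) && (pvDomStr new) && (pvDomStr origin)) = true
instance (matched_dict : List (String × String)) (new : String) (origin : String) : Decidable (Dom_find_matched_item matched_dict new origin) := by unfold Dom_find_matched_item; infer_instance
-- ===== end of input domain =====

-- B replaces A's string-rebuilding tail recursion by an iterative set-shrinking
-- loop over precomputed rule sets, sorting/joining only once at the end (objective: alternative).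

-- shared thin wrappers over PySem primitives
def pvSet (s : String) : List Char := PySem.Set.ofList s.toList
def pvJoinSorted (l : List Char) : String := String.ofList (PySem.List.sorted l (fun c => c) false)
def pvInsert (md : List (String × String)) (k v : String) : List (String × String) :=
  ((PySem.Dict.mk md).insert k v).items

-- ===== PORT A =====
-- the recursion of A, made total by fuel: each recursive step removes at least one
-- distinct character from `new` when no key is "" (Pre_ excludes the "" key, where
-- the Python recurses forever), so `|set(new)| + 1` fuel always suffices on Pre_
def pvGoA (md : List (String × String)) : Nat → String → String → List (String × String)
  | 0, new, origin => pvInsert md new origin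
  | f+1, new, origin =>
    -- 'for m in matched_dict: … if subset: return find_matched_item(…)' = first key whose set ⊆ set(new)
    match md.find? (fun kv => PySem.Set.issubset (pvSet kv.1) (pvSet new)) with
    | some kv =>
        pvGoA md f
          (pvJoinSorted (PySem.Set.diff (pvSet new) (pvSet kv.1)))
          (pvJoinSorted (PySem.Set.diff (pvSet origin) (pvSet ((PySem.Dict.mk md).getD kv.1 ""))))
    | none => pvInsert md new origin

def find_matched_item (matched_dict : List (String × String)) (new : String) (origin : String) : List (String × String) :=
  pvGoA matched_dict ((pvSet new).length + 1) new origin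

-- ===== PORT B =====
-- rules = [(set(k), set(v)) for k, v in matched_dict.items()]
def pvRules (md : List (String × String)) : List (List Char × List Char) :=
  md.map (fun kv => (pvSet kv.1, pvSet kv.2))

-- the 'while True' loop of B, made total by fuel (same sufficiency argument as for A)
def pvLoopB (rules : List (List Char × List Char)) : Nat → List Char → List Char → Bool → List Char × List Char × Bool
  | 0, sn, so, red => (sn, so, red)
  | f+1, sn, so, red =>
    match rules.find? (fun r => PySem.Set.issubset r.1 sn) with
    | some r => pvLoopB rules f (PySem.Set.diff sn r.1) (PySem.Set.diff so r.2) true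
    | none => (sn, so, red)

def find_matched_item_alt (matched_dict : List (String × String)) (new : String) (origin : String) : List (String × String) :=
  let p := pvLoopB (pvRules matched_dict) ((pvSet new).length + 1) (pvSet new) (pvSet origin) false
  if p.2.2 then pvInsert matched_dict (pvJoinSorted p.1) (pvJoinSorted p.2.1)
  else pvInsert matched_dict new origin

-- ===== PRECONDITION & SPEC =====
-- Pre_ excludes (a) dicts with an empty-string key, on which Python A recurses forever
-- (RecursionError: the empty set is a subset of every set), and (b) association lists with
-- duplicate keys, which do not represent a Python dict (dict construction collapses them).
def Pre_find_matched_item (matched_dict : List (String × String)) (new : String) (origin : String) : Prop :=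
  "" ∉ matched_dict.map Prod.fst ∧ (matched_dict.map Prod.fst).Nodup
instance (matched_dict : List (String × String)) (new : String) (origin : String) : Decidable (Pre_find_matched_item matched_dict new origin) := by unfold Pre_find_matched_item; infer_instance

def pvWitness_find_matched_item : (List (String × String)) × String × String := ([("ab", "cd")], "abc", "xcy")

def Spec_find_matched_item (matched_dict : List (String × String)) (new : String) (origin : String) (out : List (String × String)) : Prop := out = find_matched_item_alt matched_dict new origin
instance (matched_dict : List (String × String)) (new : String) (origin : String) (out : List (String × String)) : Decidable (Spec_find_matched_item matched_dict new origin out) := by unfold Spec_find_matched_item; infer_instance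

-- ===== CLAIM (what is proved, stated in full; the proofs are below) =====
def Claim_equal_find_matched_item : Prop := ∀ (matched_dict : List (String × String)) (new : String) (origin : String), Dom_find_matched_item matched_dict new origin → Pre_find_matched_item matched_dict new origin → Spec_find_matched_item matched_dict new origin (find_matched_item matched_dict new origin)

-- ===== LEMMAS AND PROOFS =====

-- subset tests agree on lists with the same members
lemma pv_issubset_congr (a s t : List Char) (h : ∀ c, c ∈ s ↔ c ∈ t) :
    PySem.Set.issubset a s = PySem.Set.issubset a t := by
  apply Bool.coe_iff_coe.mp
  rw [PySem.Set.issubset_iff, PySem.Set.issubset_iff]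
  exact ⟨fun hs c hc => (h c).mp (hs c hc), fun hs c hc => (h c).mpr (hs c hc)⟩

-- sorted-join only depends on the member set of a duplicate-free list
lemma pv_joinSorted_congr (l₁ l₂ : List Char) (h1 : l₁.Nodup) (h2 : l₂.Nodup)
    (h : ∀ c, c ∈ l₁ ↔ c ∈ l₂) : pvJoinSorted l₁ = pvJoinSorted l₂ := by
  unfold pvJoinSorted
  rw [PySem.List.sorted_eq_sorted_of_perm l₁ l₂ (fun c => c) (fun _ _ h => h)
        ((List.perm_ext_iff_of_nodup h1 h2).mpr h)]

lemma pv_mem_set_joinSorted (l : List Char) (c : Char) : c ∈ pvSet (pvJoinSorted l) ↔ c ∈ l := by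
  unfold pvSet pvJoinSorted
  rw [String.toList_ofList]
  rw [PySem.Set.mem_ofList, PySem.List.mem_sorted]

-- the flag of B's loop is write-only
lemma pvLoopB_flag_true (r : List (List Char × List Char)) :
    ∀ (f : Nat) (sn so : List Char), (pvLoopB r f sn so true).2.2 = true := by
  intro f
  induction f with
  | zero => intro sn so; rfl
  | succ f ih =>
      intro sn so
      cases hf : r.find? (fun q => PySem.Set.issubset q.1 sn) with
      | none => simp only [pvLoopB, hf]
      | some q => simp only [pvLoopB, hf]; exact ih _ _

-- starting the loop with the flag already true only forces the flag
lemma pvLoopB_flag (r : List (List Char × List Char)) :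
    ∀ (f : Nat) (sn so : List Char),
      pvLoopB r f sn so true = ((pvLoopB r f sn so false).1, (pvLoopB r f sn so false).2.1, true) := by
  intro f
  induction f with
  | zero => intro sn so; rfl
  | succ f ih =>
      intro sn so
      cases hf : r.find? (fun q => PySem.Set.issubset q.1 sn) with
      | none => simp only [pvLoopB, hf]
      | some q =>
          simp only [pvLoopB, hf]
          refine Prod.ext rfl (Prod.ext rfl ?_)
          simp only [pvLoopB_flag_true]

-- if the flag comes back false the loop did nothing
lemma pvLoopB_false (r : List (List Char × List Char)) (f : Nat) (sn so : List Char)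
    (h : (pvLoopB r f sn so false).2.2 = false) : pvLoopB r f sn so false = (sn, so, false) := by
  cases f with
  | zero => rfl
  | succ f =>
      cases hf : r.find? (fun q => PySem.Set.issubset q.1 sn) with
      | none => simp only [pvLoopB, hf]
      | some q =>
          simp only [pvLoopB, hf, pvLoopB_flag] at h
          simp at h

-- main invariant: A's recursion at fuel f equals B's loop at fuel f, provided the
-- loop state (sn, so) has the same members as set(new), set(origin)
lemma pv_main (md : List (String × String)) (hnd : (md.map Prod.fst).Nodup) :
    ∀ (f : Nat) (new origin : String) (sn so : List Char),
      sn.Nodup → so.Nodup →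
      (∀ c, c ∈ sn ↔ c ∈ pvSet new) → (∀ c, c ∈ so ↔ c ∈ pvSet origin) →
      pvGoA md f new origin =
        (let p := pvLoopB (pvRules md) f sn so false
         if p.2.2 then pvInsert md (pvJoinSorted p.1) (pvJoinSorted p.2.1)
         else pvInsert md new origin) := by
  intro f
  induction f with
  | zero => intro new origin sn so _ _ _ _; rfl
  | succ f ih =>
      intro new origin sn so hsn hso hmn hmo
      have hpred : ∀ kv : String × String,
          PySem.Set.issubset (pvSet kv.1) sn = PySem.Set.issubset (pvSet kv.1) (pvSet new) :=
        fun kv => pv_issubset_congr _ _ _ hmn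
      have hfind : (pvRules md).find? (fun r => PySem.Set.issubset r.1 sn)
          = (md.find? (fun kv => PySem.Set.issubset (pvSet kv.1) (pvSet new))).map
              (fun kv => (pvSet kv.1, pvSet kv.2)) := by
        unfold pvRules
        rw [List.find?_map]
        simp only [Function.comp_def]
        rw [funext hpred]
      simp only [pvGoA, pvLoopB, hfind]
      cases hf : md.find? (fun kv => PySem.Set.issubset (pvSet kv.1) (pvSet new)) with
      | none => simp
      | some kv =>
          simp only [Option.map_some]
          -- matched_dict[m] is kv's value: keys are unique
          have hmem : kv ∈ md := List.mem_of_find?_eq_some hf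
          have hget : (PySem.Dict.mk md).getD kv.1 "" = kv.2 := by
            apply PySem.Dict.getD_of_mem_items
            · exact hmem
            · simpa [PySem.Dict.keys] using hnd
          rw [hget]
          -- apply the induction hypothesis to the reduced state
          have hrec := ih (pvJoinSorted (PySem.Set.diff (pvSet new) (pvSet kv.1)))
              (pvJoinSorted (PySem.Set.diff (pvSet origin) (pvSet kv.2)))
              (PySem.Set.diff sn (pvSet kv.1)) (PySem.Set.diff so (pvSet kv.2))
              (PySem.Set.nodup_diff _ _ hsn) (PySem.Set.nodup_diff _ _ hso)
              (by
                intro c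
                rw [pv_mem_set_joinSorted, PySem.Set.mem_diff, PySem.Set.mem_diff, hmn c])
              (by
                intro c
                rw [pv_mem_set_joinSorted, PySem.Set.mem_diff, PySem.Set.mem_diff, hmo c])
          rw [hrec]
          simp only [pvLoopB_flag]
          cases hflag : (pvLoopB (pvRules md) f (PySem.Set.diff sn (pvSet kv.1)) (PySem.Set.diff so (pvSet kv.2)) false).2.2 with
          | true => simp_all
          | false =>
              have hid := pvLoopB_false _ _ _ _ hflag
              have e1 : pvJoinSorted (PySem.Set.diff sn (pvSet kv.1))
                  = pvJoinSorted (PySem.Set.diff (pvSet new) (pvSet kv.1)) :=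
                pv_joinSorted_congr _ _ (PySem.Set.nodup_diff _ _ hsn)
                  (PySem.Set.nodup_diff _ _ (PySem.Set.nodup_ofList _))
                  (fun c => by rw [PySem.Set.mem_diff, PySem.Set.mem_diff, hmn c])
              have e2 : pvJoinSorted (PySem.Set.diff so (pvSet kv.2))
                  = pvJoinSorted (PySem.Set.diff (pvSet origin) (pvSet kv.2)) :=
                pv_joinSorted_congr _ _ (PySem.Set.nodup_diff _ _ hso)
                  (PySem.Set.nodup_diff _ _ (PySem.Set.nodup_ofList _))
                  (fun c => by rw [PySem.Set.mem_diff, PySem.Set.mem_diff, hmo c])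
              rw [hid]
              simp [e1.symm, e2.symm]

-- ===== VERDICT (by name: the statement is the Claim_ definition above) =====
theorem find_matched_item_spec : Claim_equal_find_matched_item := by
  intro md new origin _ hpre
  unfold Spec_find_matched_item find_matched_item find_matched_item_alt
  exact pv_main md hpre.2 ((pvSet new).length + 1) new origin (pvSet new) (pvSet origin)
    (PySem.Set.nodup_ofList _) (PySem.Set.nodup_ofList _) (fun _ => Iff.rfl) (fun _ => Iff.rfl)
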